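-- pv_equiv track=rewrite | github.com/theMaxscriptGuy/ContentMate | apps/api/app/utils/text.py | infer_content_patterns
-- ===== SOURCE A (Python) =====
-- def infer_content_patterns(titles: list[str]) -> list[str]:
--     patterns = []
--     lowered_titles = [title.lower() for title in titles]
--     if any("how to" in title for title in lowered_titles):
--         patterns.append("Tutorial-led packaging appears frequently in recent uploads.")
--     if any(char.isdigit() for title in titles for char in title):
--         patterns.append("List-style or numbered framing is used to structure ideas.")
--     if any("why" in title or "mistake" in title for title in lowered_titles):
--         patterns.append("Curiosity and problem/solution framing are common hooks.")
--     if not patterns: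
--         patterns.append("Recent uploads lean on direct, topic-first titling.")
--     return patterns
-- ===== SOURCE B (Python) =====
-- def infer_content_patterns(titles: list[str]) -> list[str]:
--     # One pass: three flags updated per title, early exit once all are set.
--     has_howto = has_digit = has_curiosity = False
--     for title in titles:
--         if has_howto and has_digit and has_curiosity:
--             break
--         low = title.lower()
--         has_howto = has_howto or "how to" in low
--         has_digit = has_digit or any(c.isdigit() for c in title)
--         has_curiosity = has_curiosity or "why" in low or "mistake" in low
--     patterns = []
--     if has_howto:
--         patterns.append("Tutorial-led packaging appears frequently in recent uploads.")
--     if has_digit: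
--         patterns.append("List-style or numbered framing is used to structure ideas.")
--     if has_curiosity:
--         patterns.append("Curiosity and problem/solution framing are common hooks.")
--     if not patterns:
--         patterns.append("Recent uploads lean on direct, topic-first titling.")
--     return patterns
-- ===== Notes on version B (the rewrite author's own statement) =====
-- stated objective: alternative
-- what changed: Replaces A's three separate any()-scans over the titles (plus a pre-built lowered copy of the whole list) with a single fold that carries three boolean flags, lowercases each title once, and stops early when all flags are set; the output list is then assembled from the flags.
import Mathlib
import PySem

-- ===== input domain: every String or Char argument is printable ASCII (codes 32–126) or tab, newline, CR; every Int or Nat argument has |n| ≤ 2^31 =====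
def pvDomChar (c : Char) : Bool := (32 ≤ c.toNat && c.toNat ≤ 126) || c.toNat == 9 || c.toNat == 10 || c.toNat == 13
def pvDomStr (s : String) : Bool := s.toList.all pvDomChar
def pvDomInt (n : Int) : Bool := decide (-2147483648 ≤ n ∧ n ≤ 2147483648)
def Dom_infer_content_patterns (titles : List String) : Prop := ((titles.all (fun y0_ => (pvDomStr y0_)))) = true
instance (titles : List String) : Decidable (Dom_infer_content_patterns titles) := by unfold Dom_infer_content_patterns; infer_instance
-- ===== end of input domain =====

-- B replaces A's three separate any()-scans (over a pre-lowered copy of the list) by one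
-- fold carrying three boolean flags with an early exit; same output, one pass (alternative).

-- ===== PORT A =====
def infer_content_patterns (titles : List String) : List String :=
  let lowered_titles := titles.map PySem.Str.lower
  let patterns : List String := []
  let patterns := if lowered_titles.any (fun title => PySem.Str.isIn "how to" title)
    then patterns ++ ["Tutorial-led packaging appears frequently in recent uploads."] else patterns
  let patterns := if titles.any (fun title => title.toList.any PySem.Str.isdigit)
    then patterns ++ ["List-style or numbered framing is used to structure ideas."] else patterns
  let patterns := if lowered_titles.any (fun title => PySem.Str.isIn "why" title || PySem.Str.isIn "mistake" title)
    then patterns ++ ["Curiosity and problem/solution framing are common hooks."] else patterns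
  if patterns = [] then patterns ++ ["Recent uploads lean on direct, topic-first titling."] else patterns

-- ===== PORT B =====
-- the single-pass flag loop of Source B, with the early break as the terminating case
def pvScanFlags : List String → Bool → Bool → Bool → Bool × Bool × Bool
  | [], h, d, c => (h, d, c)
  | title :: ts, h, d, c =>
    if h && d && c then (h, d, c)
    else
      let low := PySem.Str.lower title
      pvScanFlags ts (h || PySem.Str.isIn "how to" low)
                     (d || title.toList.any PySem.Str.isdigit)
                     (c || (PySem.Str.isIn "why" low || PySem.Str.isIn "mistake" low))

def infer_content_patterns_alt (titles : List String) : List String :=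
  let (h, d, c) := pvScanFlags titles false false false
  let patterns :=
    (if h then ["Tutorial-led packaging appears frequently in recent uploads."] else []) ++
    (if d then ["List-style or numbered framing is used to structure ideas."] else []) ++
    (if c then ["Curiosity and problem/solution framing are common hooks."] else [])
  if patterns = [] then ["Recent uploads lean on direct, topic-first titling."] else patterns

-- ===== PRECONDITION & SPEC =====
def Spec_infer_content_patterns (titles : List String) (out : List String) : Prop := out = infer_content_patterns_alt titles
instance (titles : List String) (out : List String) : Decidable (Spec_infer_content_patterns titles out) := by unfold Spec_infer_content_patterns; infer_instance

-- ===== CLAIM (what is proved, stated in full; the proofs are below) =====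
def Claim_equal_infer_content_patterns : Prop := ∀ (titles : List String), Dom_infer_content_patterns titles → Spec_infer_content_patterns titles (infer_content_patterns titles)

-- ===== LEMMAS AND PROOFS =====

-- the early-exit fold computes exactly the three any-scans, or-ed onto the incoming flags
theorem pvScanFlags_eq (ts : List String) (h d c : Bool) :
    pvScanFlags ts h d c =
      (h || ts.any (fun t => PySem.Str.isIn "how to" (PySem.Str.lower t)),
       d || ts.any (fun t => t.toList.any PySem.Str.isdigit),
       c || ts.any (fun t => PySem.Str.isIn "why" (PySem.Str.lower t) ||
                             PySem.Str.isIn "mistake" (PySem.Str.lower t))) := by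
  induction ts generalizing h d c with
  | nil => simp [pvScanFlags]
  | cons t ts ih =>
    by_cases hb : h && d && c
    · have := hb
      simp only [Bool.and_eq_true] at this
      simp [pvScanFlags, hb, this.1.1, this.1.2, this.2]
    · simp only [pvScanFlags, hb, if_false, ih, List.any_cons]
      simp [Bool.or_assoc]

-- ===== VERDICT (by name: the statement is the Claim_ definition above) =====

theorem infer_content_patterns_spec : Claim_equal_infer_content_patterns := by
  intro titles _
  show infer_content_patterns titles = infer_content_patterns_alt titles
  simp only [infer_content_patterns, infer_content_patterns_alt, pvScanFlags_eq,
    Bool.false_or, List.any_map, Function.comp_def]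
  rcases hH : titles.any (fun t => PySem.Str.isIn "how to" (PySem.Str.lower t)) <;>
  rcases hD : titles.any (fun t => t.toList.any PySem.Str.isdigit) <;>
  rcases hC : titles.any (fun t => PySem.Str.isIn "why" (PySem.Str.lower t) ||
      PySem.Str.isIn "mistake" (PySem.Str.lower t)) <;>
  simp only [hH, hD, hC, if_true, if_false, Bool.false_eq_true, decide_true,
    List.nil_append, List.append_nil, List.cons_append] <;> rfl
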